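-- pv_equiv track=rewrite | github.com/IggyIkenna/basis-strategy-v1 | backend/src/basis_strategy_v1/core/health/unified_health_manager.py | _create_health_summary
-- ===== SOURCE A (Python) =====
-- from typing import Dict, Any, Optional, List, Set
--
-- def _create_health_summary(components: Dict[str, Any]) -> Dict[str, Any]:
--     """Create health summary statistics."""
--     total_components = len(components)
--     healthy_components = sum(1 for comp in components.values() if comp.get('status') == 'healthy')
--     unhealthy_components = sum(1 for comp in components.values() if comp.get('status') == 'unhealthy')
--     not_ready_components = sum(1 for comp in components.values() if comp.get('status') == 'not_ready')
--     unknown_components = sum(1 for comp in components.values() if comp.get('status') == 'unknown')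
--
--     return {
--         "total_components": total_components,
--         "healthy_components": healthy_components,
--         "unhealthy_components": unhealthy_components,
--         "not_ready_components": not_ready_components,
--         "unknown_components": unknown_components
--     }
-- ===== SOURCE B (Python) =====
-- def _create_health_summary(components):
--     """Create health summary statistics (single pass: tally statuses once, then read the table)."""
--     counts = {}
--     for comp in components.values():
--         status = comp.get('status')
--         counts[status] = counts.get(status, 0) + 1
--     return {
--         "total_components": len(components),
--         "healthy_components": counts.get('healthy', 0),
--         "unhealthy_components": counts.get('unhealthy', 0),
--         "not_ready_components": counts.get('not_ready', 0),
--         "unknown_components": counts.get('unknown', 0),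
--     }
-- ===== Notes on version B (the rewrite author's own statement) =====
-- stated objective: simpler
-- what changed: Replaces four separate scans of components.values() (one sum(...) per status) with a single loop that tallies every status into a counts dict, then reads the four entries off the table.
import Mathlib
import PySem

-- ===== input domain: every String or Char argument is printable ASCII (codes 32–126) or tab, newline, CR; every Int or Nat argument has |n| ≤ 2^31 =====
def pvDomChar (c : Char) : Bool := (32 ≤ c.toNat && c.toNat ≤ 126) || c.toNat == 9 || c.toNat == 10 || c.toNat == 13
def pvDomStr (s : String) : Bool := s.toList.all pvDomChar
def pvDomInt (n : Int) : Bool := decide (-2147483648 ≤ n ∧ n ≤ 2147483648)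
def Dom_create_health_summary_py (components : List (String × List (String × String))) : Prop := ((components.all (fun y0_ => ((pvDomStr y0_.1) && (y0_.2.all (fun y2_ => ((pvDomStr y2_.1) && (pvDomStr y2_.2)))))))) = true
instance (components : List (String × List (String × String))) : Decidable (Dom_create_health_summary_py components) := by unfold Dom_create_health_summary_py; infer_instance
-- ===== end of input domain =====

-- B replaces A's four separate scans of components.values() with one tally loop; objective: simpler.
-- ===== PORT A =====
-- sum(1 for comp in components.values() if comp.get('status') == S): sum of a 0/1 map over values()
def create_health_summary_py (components : List (String × List (String × String))) : List (String × Int) :=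
  let total_components : Int := components.length
  let healthy_components : Int :=
    ((components.map (·.2)).map (fun comp =>
      if (PySem.Dict.mk comp).get? "status" = some "healthy" then (1 : Int) else 0)).sum
  let unhealthy_components : Int :=
    ((components.map (·.2)).map (fun comp =>
      if (PySem.Dict.mk comp).get? "status" = some "unhealthy" then (1 : Int) else 0)).sum
  let not_ready_components : Int :=
    ((components.map (·.2)).map (fun comp =>
      if (PySem.Dict.mk comp).get? "status" = some "not_ready" then (1 : Int) else 0)).sum
  let unknown_components : Int :=
    ((components.map (·.2)).map (fun comp =>
      if (PySem.Dict.mk comp).get? "status" = some "unknown" then (1 : Int) else 0)).sum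
  [("total_components", total_components),
   ("healthy_components", healthy_components),
   ("unhealthy_components", unhealthy_components),
   ("not_ready_components", not_ready_components),
   ("unknown_components", unknown_components)]

-- ===== PORT B =====
-- one pass: counts[status] = counts.get(status, 0) + 1, then read the four entries off counts
def create_health_summary_py_alt (components : List (String × List (String × String))) : List (String × Int) :=
  let counts : PySem.Dict (Option String) Int :=
    components.foldl (fun d c =>
      let status := (PySem.Dict.mk c.2).get? "status"
      d.insert status (d.getD status 0 + 1)) PySem.Dict.empty
  [("total_components", (components.length : Int)),
   ("healthy_components", counts.getD (some "healthy") 0),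
   ("unhealthy_components", counts.getD (some "unhealthy") 0),
   ("not_ready_components", counts.getD (some "not_ready") 0),
   ("unknown_components", counts.getD (some "unknown") 0)]

-- ===== PRECONDITION & SPEC =====
def Spec_create_health_summary_py (components : List (String × List (String × String))) (out : List (String × Int)) : Prop := out = create_health_summary_py_alt components
instance (components : List (String × List (String × String))) (out : List (String × Int)) : Decidable (Spec_create_health_summary_py components out) := by unfold Spec_create_health_summary_py; infer_instance

-- ===== CLAIM (what is proved, stated in full; the proofs are below) =====
def Claim_equal_create_health_summary_py : Prop := ∀ (components : List (String × List (String × String))), Dom_create_health_summary_py components → Spec_create_health_summary_py components (create_health_summary_py components)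

-- ===== LEMMAS AND PROOFS =====

-- B's tally dict, read at status S, equals A's 0/1-sum scan for S.
theorem tally_getD_eq_scan (components : List (String × List (String × String)))
    (S : String) :
    (components.foldl (fun d c =>
        let status := (PySem.Dict.mk c.2).get? "status"
        d.insert status (d.getD status 0 + 1)) PySem.Dict.empty).getD (some S) 0
      = ((components.map (·.2)).map (fun comp =>
          if (PySem.Dict.mk comp).get? "status" = some S then (1 : Int) else 0)).sum := by
  have hfold :
      components.foldl (fun d c =>
          let status := (PySem.Dict.mk c.2).get? "status"
          d.insert status (d.getD status 0 + 1)) PySem.Dict.empty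
        = PySem.Dict.counter (components.map (fun c => (PySem.Dict.mk c.2).get? "status")) := by
    rw [← PySem.Dict.foldl_insert_getD_add_one_eq_counter, List.foldl_map]
  have hite : ∀ comp : List (String × String),
      (if (PySem.Dict.mk comp).get? "status" = some S then (1 : Int) else 0)
        = (if ((PySem.Dict.mk comp).get? "status" == some S) = true then (1 : Int) else 0) := by
    intro comp; simp
  rw [hfold, PySem.Dict.getD_counter]
  simp only [hite]
  rw [PySem.List.sum_map_ite_one_zero, List.count, List.countP_map, List.countP_map]
  exact congrArg Int.ofNat (List.countP_congr (fun a _ => Iff.rfl))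

-- ===== VERDICT (by name: the statement is the Claim_ definition above) =====
theorem create_health_summary_py_spec : Claim_equal_create_health_summary_py := by
  intro components _
  unfold Spec_create_health_summary_py create_health_summary_py create_health_summary_py_alt
  simp only [tally_getD_eq_scan]
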